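-- pv_equiv track=rewrite | github.com/FudanBSRL/DFM | lorenz_noise_60/discover.py | num_candidates
-- ===== SOURCE A (Python) =====
-- def num_candidates(num_Lin):
--     cnt = num_Lin + 1
--     # cnt = num_Lin
--     for i in range(num_Lin):
--         for j in range(i, num_Lin):
--             cnt += 1
--
--     for i in range(num_Lin):
--         for j in range(i, num_Lin):
--             for k in range(j, num_Lin):
--                 cnt += 1
--
--     return cnt
-- ===== SOURCE B (Python) =====
-- def num_candidates(num_Lin):
--     m = max(num_Lin, 0)
--     return num_Lin + 1 + m * (m + 1) // 2 + m * (m + 1) * (m + 2) // 6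
-- ===== Notes on version B (the rewrite author's own statement) =====
-- stated objective: faster
-- what changed: replaced the cubic nested counting loops by the closed-form triangular and tetrahedral number formulas evaluated in constant time
import Mathlib
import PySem

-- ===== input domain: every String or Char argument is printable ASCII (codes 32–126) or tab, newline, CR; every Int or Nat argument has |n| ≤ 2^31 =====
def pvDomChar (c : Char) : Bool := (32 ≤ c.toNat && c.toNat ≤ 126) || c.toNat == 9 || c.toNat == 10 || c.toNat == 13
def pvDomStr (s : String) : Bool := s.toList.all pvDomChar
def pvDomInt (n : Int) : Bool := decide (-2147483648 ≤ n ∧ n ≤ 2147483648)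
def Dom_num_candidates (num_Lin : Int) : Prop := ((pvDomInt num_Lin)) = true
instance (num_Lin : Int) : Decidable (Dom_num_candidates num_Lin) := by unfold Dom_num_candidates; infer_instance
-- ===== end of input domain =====

-- B replaces A's O(n^3) nested counting loops by the closed-form triangular/tetrahedral numbers (objective: faster).

-- ===== PORT A =====
def num_candidates (num_Lin : Int) : Int :=
  let cnt := num_Lin + 1
  let cnt := (PySem.List.pyRange 0 num_Lin 1).foldl
    (fun c i => (PySem.List.pyRange i num_Lin 1).foldl (fun c _ => c + 1) c) cnt
  let cnt := (PySem.List.pyRange 0 num_Lin 1).foldl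
    (fun c i => (PySem.List.pyRange i num_Lin 1).foldl
      (fun c j => (PySem.List.pyRange j num_Lin 1).foldl (fun c _ => c + 1) c) c) cnt
  cnt

-- ===== PORT B =====
def num_candidates_alt (num_Lin : Int) : Int :=
  let m := max num_Lin 0
  num_Lin + 1 + PySem.Int.floordiv (m * (m + 1)) 2
    + PySem.Int.floordiv (m * (m + 1) * (m + 2)) 6

-- ===== PRECONDITION & SPEC =====
def Spec_num_candidates (num_Lin : Int) (out : Int) : Prop := out = num_candidates_alt num_Lin
instance (num_Lin : Int) (out : Int) : Decidable (Spec_num_candidates num_Lin out) := by unfold Spec_num_candidates; infer_instance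

-- ===== CLAIM (what is proved, stated in full; the proofs are below) =====
def Claim_equal_num_candidates : Prop := ∀ (num_Lin : Int), Dom_num_candidates num_Lin → Spec_num_candidates num_Lin (num_candidates num_Lin)

-- ===== LEMMAS AND PROOFS =====

-- triangular and tetrahedral numbers, recursively
def pvG2 : Nat → Int
  | 0 => 0
  | k + 1 => (k + 1 : Int) + pvG2 k

def pvG3 : Nat → Int
  | 0 => 0
  | k + 1 => pvG2 (k + 1) + pvG3 k

lemma foldl_count (l : List Int) (c : Int) :
    l.foldl (fun c _ => c + 1) c = c + l.length := by
  induction l generalizing c with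
  | nil => simp
  | cons x xs ih => simp [List.foldl, ih]; ring

lemma L2 (n : Int) : ∀ (k : Nat) (a c : Int), (n - a).toNat = k →
    (PySem.List.pyRange a n 1).foldl
      (fun c i => (PySem.List.pyRange i n 1).foldl (fun c _ => c + 1) c) c
    = c + pvG2 k := by
  intro k
  induction k with
  | zero =>
    intro a c h
    rw [PySem.List.pyRange_one_eq_nil (by omega)]
    simp [pvG2]
  | succ k ih =>
    intro a c h
    rw [PySem.List.pyRange_one_cons (by omega)]
    simp only [List.foldl_cons]
    rw [foldl_count, PySem.List.length_pyRange_one,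
        ih (a + 1) _ (by omega)]
    have : ((n - a).toNat : Int) = (k + 1 : Int) := by omega
    rw [this]
    simp [pvG2]
    ring

lemma L3 (n : Int) : ∀ (k : Nat) (a c : Int), (n - a).toNat = k →
    (PySem.List.pyRange a n 1).foldl
      (fun c i => (PySem.List.pyRange i n 1).foldl
        (fun c j => (PySem.List.pyRange j n 1).foldl (fun c _ => c + 1) c) c) c
    = c + pvG3 k := by
  intro k
  induction k with
  | zero =>
    intro a c h
    rw [PySem.List.pyRange_one_eq_nil (by omega)]
    simp [pvG3]
  | succ k ih =>
    intro a c h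
    rw [PySem.List.pyRange_one_cons (by omega)]
    simp only [List.foldl_cons]
    rw [L2 n (k + 1) a c (by omega), ih (a + 1) _ (by omega)]
    simp [pvG3]
    ring

lemma pvG2_mul (k : Nat) : 2 * pvG2 k = (k : Int) * (k + 1) := by
  induction k with
  | zero => simp [pvG2]
  | succ k ih => simp [pvG2]; push_cast at ih ⊢; ring_nf; ring_nf at ih; omega

lemma pvG3_mul (k : Nat) : 6 * pvG3 k = (k : Int) * (k + 1) * (k + 2) := by
  induction k with
  | zero => simp [pvG3]
  | succ k ih =>
    have h2 := pvG2_mul (k + 1)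
    simp only [pvG3]
    push_cast
    push_cast at ih h2
    nlinarith [ih, h2]

lemma pvG2_closed (k : Nat) : pvG2 k = PySem.Int.floordiv ((k : Int) * (k + 1)) 2 := by
  rw [PySem.Int.floordiv_eq_ediv_of_pos (by norm_num), ← pvG2_mul k,
      Int.mul_ediv_cancel_left _ (by norm_num)]

lemma pvG3_closed (k : Nat) : pvG3 k = PySem.Int.floordiv ((k : Int) * (k + 1) * (k + 2)) 6 := by
  rw [PySem.Int.floordiv_eq_ediv_of_pos (by norm_num), ← pvG3_mul k,
      Int.mul_ediv_cancel_left _ (by norm_num)]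

-- ===== VERDICT (by name: the statement is the Claim_ definition above) =====
theorem num_candidates_spec : Claim_equal_num_candidates := by
  intro n _
  unfold Spec_num_candidates num_candidates num_candidates_alt
  simp only []
  rw [L2 n n.toNat 0 (n + 1) (by omega), L3 n n.toNat 0 _ (by omega),
      pvG2_closed, pvG3_closed]
  have hm : max n 0 = (n.toNat : Int) := by omega
  rw [hm]
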